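-- pv_equiv track=rewrite | github.com/Pradeep2803/SHA-Algorithm | test.py | initializer
-- ===== SOURCE A (Python) =====
-- def fillZeros(bits, length=8, endian='LE'):
--     if isinstance(bits, int):
--         # Convert integer to list of bits
--         bits = [int(bit) for bit in bin(bits)[2:].zfill(32)]
--
--     l = len(bits)
--     if endian == 'LE':
--         for i in range(l, length):
--             bits.append(0)
--     else:
--         while l < length:
--             bits.insert(0, 0)
--             l = len(bits)
--     return bits
--
-- def initializer(values):
--     #convert from hex to python binary string (with cut bin indicator ('0b'))
--     binaries = [bin(int(v, 16))[2:] for v in values]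
--     #convert from python string representation to a list of 32 bit lists
--     words = []
--     for binary in binaries:
--         word = []
--         for b in binary:
--             word.append(int(b))
--         words.append(fillZeros(word, 32, 'BE'))
--     return words
-- ===== SOURCE B (Python) =====
-- def initializer(values):
--     words = []
--     for v in values:
--         n = int(v, 16)
--         L = max(32, n.bit_length())
--         words.append([(n >> i) & 1 for i in range(L - 1, -1, -1)])
--     return words
-- ===== Notes on version B (the rewrite author's own statement) =====
-- stated objective: alternative
-- what changed: B extracts each bit arithmetically via (n >> i) & 1 over range(max(32, n.bit_length())-1, -1, -1) in one pass, instead of formatting a binary string with bin(), mapping its characters to ints, and left-padding the list with an insert(0,0) loop.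
import Mathlib
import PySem

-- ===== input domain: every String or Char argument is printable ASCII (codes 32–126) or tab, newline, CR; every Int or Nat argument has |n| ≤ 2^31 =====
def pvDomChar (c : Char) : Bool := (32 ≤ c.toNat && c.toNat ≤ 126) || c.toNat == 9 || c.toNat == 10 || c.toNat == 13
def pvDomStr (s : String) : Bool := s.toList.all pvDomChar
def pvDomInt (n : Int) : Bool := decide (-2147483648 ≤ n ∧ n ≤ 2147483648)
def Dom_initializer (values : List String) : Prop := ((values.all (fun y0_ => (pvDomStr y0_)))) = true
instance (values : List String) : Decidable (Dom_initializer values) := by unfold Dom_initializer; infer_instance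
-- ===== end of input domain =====

-- B computes each 32-bit word by arithmetic shift-and-mask instead of A's bin()-string
-- formatting plus char-to-int mapping and an insert-at-front padding loop; same cost.

-- ===== PORT A =====
-- bin(m)[2:] for a nonnegative value, digit list built MSB-first as bin does
def binChars (m : Nat) : List Char :=
  if m = 0 then [] else binChars (m / 2) ++ [if m % 2 = 1 then '1' else '0']

def pyBin (n : Int) : List Char :=
  if n = 0 then ['0'] else binChars n.toNat

-- the 'BE' branch of fillZeros: while l < length: bits.insert(0, 0)
def fillZerosBE (bits : List Int) (length : Nat) : List Int :=
  if bits.length < length then fillZerosBE (0 :: bits) length else bits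
termination_by length - bits.length

def initializer (values : List String) : List (List Int) :=
  let binaries := values.map (fun v => pyBin ((PySem.Int.ofStrBase? v 16).getD 0))
  -- int(b) on a character of bin's output ('0' or '1'); exact on those characters
  binaries.map (fun binary => fillZerosBE (binary.map (fun b => if b = '1' then (1 : Int) else 0)) 32)

-- ===== PORT B =====
def wordOf (n : Int) : List Int :=
  let L : Nat := max 32 (PySem.Int.bitLength n)
  (PySem.List.pyRange ((L : Int) - 1) (-1) (-1)).map
    (fun i => PySem.Int.mod (PySem.Int.floordiv n (2 ^ i.toNat)) 2)

def initializer_alt (values : List String) : List (List Int) :=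
  values.map (fun v => wordOf ((PySem.Int.ofStrBase? v 16).getD 0))

-- ===== PRECONDITION & SPEC =====
-- Pre_ admits exactly the inputs where A returns: every string parses under int(v, 16)
-- (else ValueError) to a NONNEGATIVE value (on negatives bin(n)[2:] starts with 'b' and
-- A's int(b) raises ValueError).
def Pre_initializer (values : List String) : Prop :=
  (values.all (fun v =>
    match PySem.Int.ofStrBase? v 16 with
    | some n => decide (0 ≤ n)
    | none => false)) = true
instance (values : List String) : Decidable (Pre_initializer values) := by
  unfold Pre_initializer; infer_instance

def pvWitness_initializer : List String := ["0", "1F"]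

def Spec_initializer (values : List String) (out : List (List Int)) : Prop := out = initializer_alt values
instance (values : List String) (out : List (List Int)) : Decidable (Spec_initializer values out) := by unfold Spec_initializer; infer_instance

-- ===== CLAIM (what is proved, stated in full; the proofs are below) =====
def Claim_equal_initializer : Prop := ∀ (values : List String), Dom_initializer values → Pre_initializer values → Spec_initializer values (initializer values)

-- ===== LEMMAS AND PROOFS =====

-- the bit list [m >> (L-1-k) & 1 for k in range L] (MSB first, L bits)
def bitsUpTo (m L : Nat) : List Int :=
  (List.range L).map (fun k => ((m / 2 ^ (L - 1 - k)) % 2 : Nat))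

theorem bitsUpTo_cons (m L : Nat) :
    bitsUpTo m (L + 1) = ((m / 2 ^ L % 2 : Nat) : Int) :: bitsUpTo m L := by
  simp only [bitsUpTo, List.range_succ_eq_map, List.map_map, List.map_cons, Function.comp_def]
  congr 1
  apply List.map_congr_left
  intro a ha
  rw [List.mem_range] at ha
  have h1 : L + 1 - 1 - a.succ = L - 1 - a := by omega
  rw [h1]

theorem bitsUpTo_snoc (m L : Nat) :
    bitsUpTo m (L + 1) = bitsUpTo (m / 2) L ++ [((m % 2 : Nat) : Int)] := by
  unfold bitsUpTo
  rw [List.range_succ, List.map_append]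
  congr 1
  · apply List.map_congr_left
    intro k hk
    rw [List.mem_range] at hk
    have h1 : L + 1 - 1 - k = (L - 1 - k) + 1 := by omega
    rw [h1, pow_succ, Nat.div_div_eq_div_mul, Nat.mul_comm, ← Nat.div_div_eq_div_mul]
  · simp

theorem length_bitsUpTo (m L : Nat) : (bitsUpTo m L).length = L := by
  simp [bitsUpTo]

theorem binChars_map (m : Nat) :
    (binChars m).map (fun b => if b = '1' then (1 : Int) else 0)
      = bitsUpTo m (PySem.Int.bitLength (m : Int)) := by
  induction m using Nat.strong_induction_on with
  | _ m ih =>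
    by_cases h0 : m = 0
    · subst h0; simp [binChars, bitsUpTo]
    · rw [binChars, if_neg h0, List.map_append,
        ih (m / 2) (Nat.div_lt_self (Nat.pos_of_ne_zero h0) (by norm_num)),
        PySem.Int.bitLength_natCast (Nat.pos_of_ne_zero h0), bitsUpTo_snoc]
      congr 1
      rcases Nat.mod_two_eq_zero_or_one m with h | h <;> simp [h]

theorem lt_two_pow_bl (m : Nat) : m < 2 ^ PySem.Int.bitLength (m : Int) := by
  have := PySem.Int.lt_two_pow_bitLength (m : Int)
  simpa using this

theorem bitsUpTo_pad (m L j : Nat) (h : m < 2 ^ L) :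
    bitsUpTo m (L + j) = List.replicate j 0 ++ bitsUpTo m L := by
  induction j with
  | zero => simp
  | succ j ih =>
    have hlt : m < 2 ^ (L + j) :=
      lt_of_lt_of_le h (Nat.pow_le_pow_right (by norm_num) (Nat.le_add_right _ _))
    have : (L + (j + 1)) = (L + j) + 1 := by omega
    rw [this, bitsUpTo_cons, ih, Nat.div_eq_of_lt hlt]
    simp [List.replicate_succ]

theorem fillZerosBE_eq (bits : List Int) (len : Nat) :
    fillZerosBE bits len = List.replicate (len - bits.length) 0 ++ bits := by
  rw [fillZerosBE]
  split
  · rename_i h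
    have hrec := fillZerosBE_eq (0 :: bits) len
    rw [hrec]
    have h1 : len - bits.length = (len - (0 :: bits).length) + 1 := by
      simp at *; omega
    rw [h1, List.replicate_succ', List.append_assoc]
    simp
  · rename_i h
    have : len - bits.length = 0 := by omega
    simp [this]
termination_by len - bits.length

theorem wordOf_natCast (m : Nat) :
    wordOf (m : Int) = bitsUpTo m (max 32 (PySem.Int.bitLength (m : Int))) := by
  simp only [wordOf, bitsUpTo]
  generalize max 32 (PySem.Int.bitLength (m : Int)) = L
  rw [PySem.List.pyRange_neg_one]
  rw [show ((((L : Int) - 1) - (-1)).toNat) = L from by omega]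
  rw [List.map_map]
  apply List.map_congr_left
  simp only [Function.comp_def]
  intro k hk
  rw [List.mem_range] at hk
  have htn : ((L : Int) - 1 - k).toNat = L - 1 - k := by omega
  simp only [htn]
  have h2 : ((2 : Int) ^ (L - 1 - k)) = (((2 ^ (L - 1 - k) : Nat)) : Int) := by push_cast; ring
  rw [h2, PySem.Int.floordiv_natCast]
  exact_mod_cast PySem.Int.mod_natCast (m / 2 ^ (L - 1 - k)) 2

theorem word_eq (n : Int) (hn : 0 ≤ n) :
    fillZerosBE ((pyBin n).map (fun b => if b = '1' then (1 : Int) else 0)) 32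
      = wordOf n := by
  obtain ⟨m, rfl⟩ : ∃ m : Nat, n = (m : Int) := ⟨n.toNat, (Int.toNat_of_nonneg hn).symm⟩
  rw [wordOf_natCast]
  set bl : Nat := PySem.Int.bitLength (m : Int) with hbl
  by_cases h0 : m = 0
  · subst h0
    have hbl0 : bl = 0 := by rw [hbl]; decide
    rw [show pyBin ((0 : Nat) : Int) = ['0'] by rfl]
    rw [fillZerosBE_eq]
    have hpad := bitsUpTo_pad 0 1 31 (by norm_num)
    simp only [hbl0]
    rw [show max 32 0 = 1 + 31 by norm_num, hpad]
    simp [bitsUpTo]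
  · have hpy : pyBin ((m : Nat) : Int) = binChars m := by
      rw [pyBin, if_neg (by exact_mod_cast h0), Int.toNat_natCast]
    rw [hpy, binChars_map, fillZerosBE_eq, length_bitsUpTo, ← hbl]
    have hmax : max 32 bl = bl + (32 - bl) := by omega
    rw [hmax, bitsUpTo_pad m bl (32 - bl) (lt_two_pow_bl m)]

-- ===== VERDICT (by name: the statement is the Claim_ definition above) =====
theorem initializer_spec : Claim_equal_initializer := by
  intro values _hdom hpre
  unfold Spec_initializer initializer initializer_alt
  simp only [List.map_map]
  apply List.map_congr_left
  intro v hv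
  simp only [Function.comp_def]
  unfold Pre_initializer at hpre
  rw [List.all_eq_true] at hpre
  have := hpre v hv
  cases hp : PySem.Int.ofStrBase? v 16 with
  | none => rw [hp] at this; simp at this
  | some n =>
    rw [hp] at this
    simp only [Option.getD_some] at *
    exact word_eq n (by simpa using this)
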